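-- pv_equiv track=rewrite | github.com/bestvibes/guitab | train.py | midi_to_label
-- ===== SOURCE A (Python) =====
-- strings = [40, 45, 50, 55, 60, 65];
--
-- def midi_to_label(midi):
--     if (midi < strings[0]):
--         raise Error("Note " + note + " is not playable on a guitar in standard tuning.")
--
--     idealString = 0
--     for string, string_midi in enumerate(strings):
--         if (midi < string_midi):
--             break
--         idealString = string
--
--     label = [-1, -1, -1, -1, -1, -1]
--     label[idealString] = midi - strings[idealString];
--     return label
-- ===== SOURCE B (Python) =====
-- strings = [40, 45, 50, 55, 60, 65]
--
-- def midi_to_label(midi):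
--     if midi < strings[0]:
--         raise ValueError("Note %d is not playable on a guitar in standard tuning." % midi)
--     idx = min(len(strings) - 1, (midi - strings[0]) // 5)
--     label = [-1] * len(strings)
--     label[idx] = midi - strings[idx]
--     return label
-- ===== Notes on version B (the rewrite author's own statement) =====
-- stated objective: simpler
-- what changed: Replaces the enumerate/break scan over the tuning list by a closed-form index min(5,(midi-40)//5), valid because the tuning is arithmetic with step 5.
import Mathlib
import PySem

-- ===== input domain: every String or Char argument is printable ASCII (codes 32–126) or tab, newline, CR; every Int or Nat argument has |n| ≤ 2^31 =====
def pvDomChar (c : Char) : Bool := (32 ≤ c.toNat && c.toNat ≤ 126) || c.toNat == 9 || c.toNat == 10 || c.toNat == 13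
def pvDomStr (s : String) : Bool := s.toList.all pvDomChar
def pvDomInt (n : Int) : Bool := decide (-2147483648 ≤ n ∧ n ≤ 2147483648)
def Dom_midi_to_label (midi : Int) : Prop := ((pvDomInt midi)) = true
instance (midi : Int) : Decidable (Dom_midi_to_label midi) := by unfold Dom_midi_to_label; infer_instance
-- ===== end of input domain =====

-- B changes only the computation of the string index (closed form instead of a scan);
-- both programs raise on notes below the lowest string (A a NameError from the undefined Error/note, B a ValueError),
-- so those inputs are outside Pre_.

-- ===== PORT A =====
-- module-level tuning list
def pvStrings : List Int := [40, 45, 50, 55, 60, 65]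

-- Python's enumerate
def pvEnumerate : List Int → Nat → List (Nat × Int)
  | [], _ => []
  | x :: xs, i => (i, x) :: pvEnumerate xs (i + 1)

-- the 'for string, string_midi in enumerate(strings): if midi < string_midi: break; idealString = string' loop
def pvALoop (midi : Int) : List (Nat × Int) → Nat → Nat
  | [], ideal => ideal
  | (s, sm) :: rest, ideal => if midi < sm then ideal else pvALoop midi rest s

def midi_to_label (midi : Int) : List Int :=
  if midi < pvStrings.getD 0 0 then []  -- raise NameError: outside Pre_
  else
    let idealString := pvALoop midi (pvEnumerate pvStrings 0) 0
    let label : List Int := [-1, -1, -1, -1, -1, -1]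
    label.set idealString (midi - pvStrings.getD idealString 0)

-- ===== PORT B =====
def pvStringsB : List Int := [40, 45, 50, 55, 60, 65]

def midi_to_label_alt (midi : Int) : List Int :=
  if midi < pvStringsB.getD 0 0 then []  -- raise ValueError: outside Pre_
  else
    let idx := (min ((pvStringsB.length : Int) - 1) (PySem.Int.floordiv (midi - pvStringsB.getD 0 0) 5)).toNat
    let label : List Int := List.replicate pvStringsB.length (-1)
    label.set idx (midi - pvStringsB.getD idx 0)

-- ===== PRECONDITION & SPEC =====
-- Pre_ excludes notes below the lowest string, on which A raises a NameError (undefined 'Error'/'note').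
def Pre_midi_to_label (midi : Int) : Prop := 40 ≤ midi
instance (midi : Int) : Decidable (Pre_midi_to_label midi) := by unfold Pre_midi_to_label; infer_instance
def pvWitness_midi_to_label : Int := (52)

def Spec_midi_to_label (midi : Int) (out : List Int) : Prop := out = midi_to_label_alt midi
instance (midi : Int) (out : List Int) : Decidable (Spec_midi_to_label midi out) := by unfold Spec_midi_to_label; infer_instance

-- ===== CLAIM (what is proved, stated in full; the proofs are below) =====
def Claim_equal_midi_to_label : Prop := ∀ (midi : Int), Dom_midi_to_label midi → Pre_midi_to_label midi → Spec_midi_to_label midi (midi_to_label midi)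

-- ===== LEMMAS AND PROOFS =====
theorem midi_to_label_eq (midi : Int) (h : 40 ≤ midi) :
    midi_to_label midi = midi_to_label_alt midi := by
  have h40 : ¬ midi < 40 := by omega
  unfold midi_to_label midi_to_label_alt pvStrings pvStringsB
  simp only [pvEnumerate, List.getD, List.length]
  by_cases h45 : midi < 45
  · have : min ((5 : Int)) ((midi - 40) / 5) = 0 := by omega
    simp [pvALoop, h40, h45, this]
  · by_cases h50 : midi < 50
    · have : min ((5 : Int)) ((midi - 40) / 5) = 1 := by omega
      simp [pvALoop, h40, h45, h50, this]
    · by_cases h55 : midi < 55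
      · have : min ((5 : Int)) ((midi - 40) / 5) = 2 := by omega
        simp [pvALoop, h40, h45, h50, h55, this]
      · by_cases h60 : midi < 60
        · have : min ((5 : Int)) ((midi - 40) / 5) = 3 := by omega
          simp [pvALoop, h40, h45, h50, h55, h60, this]
        · by_cases h65 : midi < 65
          · have : min ((5 : Int)) ((midi - 40) / 5) = 4 := by omega
            simp [pvALoop, h40, h45, h50, h55, h60, h65, this]
          · have : min ((5 : Int)) ((midi - 40) / 5) = 5 := by omega
            simp [pvALoop, h40, h45, h50, h55, h60, h65, this]

-- ===== VERDICT (by name: the statement is the Claim_ definition above) =====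
theorem midi_to_label_spec : Claim_equal_midi_to_label := by
  intro midi _ hpre
  exact midi_to_label_eq midi hpre
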